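-- pv_equiv track=rewrite | github.com/Independent-Dev/PS | BOJ/greedy/1946_1.py | max_qualifier
-- ===== SOURCE A (Python) =====
-- def max_qualifier(result):
--     MAX = 100001
--     count = 0
--
--     for second in result:
--         # 첫 번째 시험 결과가 앞 사람보다 좋지 않지만, 두 번째 시험 결과는 더 나은 경우
--         if second < MAX:
--             count += 1
--             MAX = second
--     return count
-- ===== SOURCE B (Python) =====
-- from itertools import accumulate, chain
--
--
-- def max_qualifier(result):
--     mins = list(accumulate(chain([100001], result), min))
--     return sum(1 for a, b in zip(mins, mins[1:]) if b < a)
-- ===== Notes on version B (the rewrite author's own statement) =====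
-- stated objective: alternative
-- what changed: Replaces the fused single pass holding (MAX,count) state with a build-then-scan decomposition: first materialise the running-minimum table via accumulate with a 100001 sentinel, then count strict decreases between adjacent table entries.
import Mathlib
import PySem

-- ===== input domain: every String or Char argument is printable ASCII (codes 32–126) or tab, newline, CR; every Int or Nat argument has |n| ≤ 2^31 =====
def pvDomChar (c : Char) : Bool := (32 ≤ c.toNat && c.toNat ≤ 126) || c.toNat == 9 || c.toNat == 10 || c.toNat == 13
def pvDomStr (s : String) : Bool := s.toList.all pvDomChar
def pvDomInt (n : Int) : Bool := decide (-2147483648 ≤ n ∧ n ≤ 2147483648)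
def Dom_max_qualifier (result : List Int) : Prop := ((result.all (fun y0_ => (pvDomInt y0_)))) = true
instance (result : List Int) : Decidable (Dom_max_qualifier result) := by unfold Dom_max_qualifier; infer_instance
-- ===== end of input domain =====

-- B replaces A's fused single pass holding (MAX,count) state with a build-then-scan decomposition:
-- it first materialises the running-minimum table (scanl/accumulate with the 100001 sentinel), then
-- counts strict decreases between adjacent entries; an alternative of the same cost, not faster.

-- ===== PORT A =====
def max_qualifier (result : List Int) : Int :=
  (result.foldl (fun (s : Int × Int) second =>
      if second < s.1 then (second, s.2 + 1) else s) (100001, 0)).2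

-- ===== PORT B =====
-- mins = accumulate([100001]+result, min); count adjacent strict decreases
def max_qualifier_alt (result : List Int) : Int :=
  let mins := List.scanl min (100001 : Int) result
  (((mins.zip mins.tail).filter (fun p => decide (p.2 < p.1))).length : Int)

-- ===== PRECONDITION & SPEC =====
def Spec_max_qualifier (result : List Int) (out : Int) : Prop := out = max_qualifier_alt result
instance (result : List Int) (out : Int) : Decidable (Spec_max_qualifier result out) := by unfold Spec_max_qualifier; infer_instance

-- ===== CLAIM (what is proved, stated in full; the proofs are below) =====
def Claim_equal_max_qualifier : Prop := ∀ (result : List Int), Dom_max_qualifier result → Spec_max_qualifier result (max_qualifier result)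

-- ===== LEMMAS AND PROOFS =====
theorem pv_fold_scanl (l : List Int) : ∀ (M c : Int),
    (l.foldl (fun (s : Int × Int) second =>
        if second < s.1 then (second, s.2 + 1) else s) (M, c)).2
      = c + ((((List.scanl min M l).zip (List.scanl min M l).tail).filter
          (fun p => decide (p.2 < p.1))).length : Int) := by
  induction l with
  | nil => intro M c; simp [List.scanl_nil]
  | cons h t ih =>
    intro M c
    obtain ⟨r, hr⟩ : ∃ r, List.scanl min (min M h) t = min M h :: r := by
      cases t with
      | nil => exact ⟨[], by simp⟩
      | cons a t' => exact ⟨_, by rw [List.scanl_cons]⟩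
    rw [List.foldl_cons, List.scanl_cons, List.tail_cons, hr,
        List.zip_cons_cons, List.filter_cons]
    by_cases hlt : h < M
    · have e1 : (if h < M then ((h : Int), c + 1) else (M, c)) = (h, c + 1) := by
        simp [hlt]
      have e2 : min M h = h := by omega
      rw [e2] at hr
      rw [e1, e2, ih h (c + 1), hr]
      simp [hlt]
      ring
    · have e1 : (if h < M then ((h : Int), c + 1) else (M, c)) = (M, c) := by
        simp [hlt]
      have e2 : min M h = M := by omega
      rw [e2] at hr
      rw [e1, e2, ih M c, hr]
      simp [hlt]

-- ===== VERDICT (by name: the statement is the Claim_ definition above) =====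
theorem max_qualifier_spec : Claim_equal_max_qualifier := by
  intro result _
  unfold Spec_max_qualifier max_qualifier max_qualifier_alt
  rw [pv_fold_scanl result 100001 0]
  simp
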